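-- pv_equiv track=rewrite | github.com/reshinto/algo_flow | src/algorithms/sets/operations/multiset-union/sources/multiset-union.py | multiset_union
-- ===== SOURCE A (Python) =====
-- def multiset_union(array_a: list[int], array_b: list[int]) -> list[int]:
--     counts_a: dict[int, int] = {}  # @step:initialize
--     counts_b: dict[int, int] = {}  # @step:initialize
--     result: list[int] = []  # @step:initialize
--
--     # Phase 1: count frequencies in array_a
--     for value_a in array_a:
--         counts_a[value_a] = counts_a.get(value_a, 0) + 1  # @step:count-element
--
--     # Phase 2: count frequencies in array_b
--     for value_b in array_b:
--         counts_b[value_b] = counts_b.get(value_b, 0) + 1  # @step:count-element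
--
--     # Phase 3: for each unique element take max(count_a, count_b) copies
--     all_keys = set(counts_a) | set(counts_b)
--     for value in all_keys:
--         count_a = counts_a.get(value, 0)
--         count_b = counts_b.get(value, 0)
--         max_count = max(count_a, count_b)  # @step:compare-count
--         for _ in range(max_count):
--             result.append(value)  # @step:add-to-result
--
--     result.sort()
--     return result  # @step:complete
-- ===== SOURCE B (Python) =====
-- def multiset_union(array_a: list[int], array_b: list[int]) -> list[int]:
--     # Run-length merge of the two sorted copies: no frequency dicts, no final sort.
--     xs, ys = sorted(array_a), sorted(array_b)
--     out: list[int] = []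
--     i = j = 0
--     while i < len(xs) or j < len(ys):
--         if j == len(ys) or (i < len(xs) and xs[i] <= ys[j]):
--             v = xs[i]
--         else:
--             v = ys[j]
--         i2 = i
--         while i2 < len(xs) and xs[i2] == v:
--             i2 += 1
--         j2 = j
--         while j2 < len(ys) and ys[j2] == v:
--             j2 += 1
--         out += [v] * max(i2 - i, j2 - j)
--         i, j = i2, j2
--     return out
-- ===== Notes on version B (the rewrite author's own statement) =====
-- stated objective: alternative
-- what changed: Replaces the two frequency dicts + set-of-keys iteration + final sort by a run-length merge of the two sorted copies with two pointers, emitting max(run_a, run_b) copies of each value directly in order.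
import Mathlib
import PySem

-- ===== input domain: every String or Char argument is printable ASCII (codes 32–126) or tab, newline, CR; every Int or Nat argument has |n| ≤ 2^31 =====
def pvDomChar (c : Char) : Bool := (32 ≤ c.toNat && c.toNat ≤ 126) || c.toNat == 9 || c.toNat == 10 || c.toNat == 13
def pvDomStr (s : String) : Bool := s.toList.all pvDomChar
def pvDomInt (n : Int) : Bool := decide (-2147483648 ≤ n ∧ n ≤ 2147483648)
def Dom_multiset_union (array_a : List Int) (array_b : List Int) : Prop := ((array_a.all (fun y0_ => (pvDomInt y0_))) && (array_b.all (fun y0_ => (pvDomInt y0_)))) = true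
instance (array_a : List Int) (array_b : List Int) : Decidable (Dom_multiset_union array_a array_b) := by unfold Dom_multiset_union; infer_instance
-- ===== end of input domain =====

-- B replaces A's frequency dicts + key-set iteration + final sort by a run-length
-- merge of the two sorted copies (alternative decomposition, same asymptotic cost).
-- Neither implementation mutates its arguments.

-- ===== PORT A =====
def multiset_union (array_a : List Int) (array_b : List Int) : List Int :=
  let counts_a : PySem.Dict Int Int :=
    array_a.foldl (fun d x => d.insert x (d.getD x 0 + 1)) PySem.Dict.empty
  let counts_b : PySem.Dict Int Int :=
    array_b.foldl (fun d x => d.insert x (d.getD x 0 + 1)) PySem.Dict.empty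
  let all_keys : PySem.Set Int :=
    PySem.Set.union (PySem.Set.ofList counts_a.keys) (PySem.Set.ofList counts_b.keys)
  -- the loop appends value max_count times and the list is then sorted, so the
  -- (unmodelled) set iteration order cannot influence the returned value
  let result : List Int :=
    all_keys.foldl (fun res v =>
      (PySem.List.pyRange 0 (max (counts_a.getD v 0) (counts_b.getD v 0)) 1).foldl
        (fun r _ => r ++ [v]) res) []
  PySem.List.sorted result (fun x => x) false

-- ===== PORT B =====
def runSplit (v : Int) : List Int → Nat × List Int
  | [] => (0, [])
  | x :: xs => if x = v then ((runSplit v xs).1 + 1, (runSplit v xs).2) else (0, x :: xs)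
theorem runSplit_decomp (v : Int) (l : List Int) :
    l = List.replicate (runSplit v l).1 v ++ (runSplit v l).2 := by
  induction l with
  | nil => rfl
  | cons x xs ih =>
    by_cases h : x = v
    · simp [runSplit, h, List.replicate_succ]; exact ih
    · simp [runSplit, h]
theorem runSplit_len (v : Int) (l : List Int) :
    (runSplit v l).2.length + (runSplit v l).1 = l.length := by
  conv_rhs => rw [runSplit_decomp v l]
  simp; omega
theorem runSplit_pos (v x : Int) (xs : List Int) (hx : x = v) :
    0 < (runSplit v (x :: xs)).1 := by simp [runSplit, hx]
def mergeRuns (xs ys : List Int) : List Int :=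
  match xs, ys with
  | [], [] => []
  | x :: xs', [] =>
    List.replicate (max (runSplit x (x :: xs')).1 0) x ++ mergeRuns (runSplit x (x :: xs')).2 []
  | [], y :: ys' =>
    List.replicate (max 0 (runSplit y (y :: ys')).1) y ++ mergeRuns [] (runSplit y (y :: ys')).2
  | x :: xs', y :: ys' =>
    let v := if x ≤ y then x else y
    List.replicate (max (runSplit v (x :: xs')).1 (runSplit v (y :: ys')).1) v ++
      mergeRuns (runSplit v (x :: xs')).2 (runSplit v (y :: ys')).2
termination_by xs.length + ys.length
decreasing_by
  · have h1 := runSplit_len x (x :: xs')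
    have h2 := runSplit_pos x x xs' rfl
    simp only [List.length_cons, List.length_nil] at *; omega
  · have h1 := runSplit_len y (y :: ys')
    have h2 := runSplit_pos y y ys' rfl
    simp only [List.length_cons, List.length_nil] at *; omega
  · simp only [dite_eq_ite]
    have h1 := runSplit_len (if x ≤ y then x else y) (x :: xs')
    have h2 := runSplit_len (if x ≤ y then x else y) (y :: ys')
    have h3 : 0 < (runSplit (if x ≤ y then x else y) (x :: xs')).1 +
        (runSplit (if x ≤ y then x else y) (y :: ys')).1 := by
      by_cases hxy : x ≤ y
      · have := runSplit_pos (if x ≤ y then x else y) x xs' (by simp [hxy]); omega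
      · have := runSplit_pos (if x ≤ y then x else y) y ys' (by simp [hxy]); omega
    simp only [List.length_cons] at *; omega


def multiset_union_alt (array_a : List Int) (array_b : List Int) : List Int :=
  mergeRuns (PySem.List.sorted array_a (fun x => x) false)
            (PySem.List.sorted array_b (fun x => x) false)

-- ===== PRECONDITION & SPEC =====
def Spec_multiset_union (array_a : List Int) (array_b : List Int) (out : List Int) : Prop := out = multiset_union_alt array_a array_b
instance (array_a : List Int) (array_b : List Int) (out : List Int) : Decidable (Spec_multiset_union array_a array_b out) := by unfold Spec_multiset_union; infer_instance

-- ===== CLAIM (what is proved, stated in full; the proofs are below) =====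
def Claim_equal_multiset_union : Prop := ∀ (array_a : List Int) (array_b : List Int), Dom_multiset_union array_a array_b → Spec_multiset_union array_a array_b (multiset_union array_a array_b)

-- ===== LEMMAS AND PROOFS =====

theorem runSplit_count_self (v : Int) (l : List Int) :
    l.count v = (runSplit v l).1 + (runSplit v l).2.count v := by
  conv_lhs => rw [runSplit_decomp v l]
  simp [List.count_append]
theorem runSplit_count_ne (v w : Int) (l : List Int) (h : w ≠ v) :
    (runSplit v l).2.count w = l.count w := by
  conv_rhs => rw [runSplit_decomp v l]
  simp [List.count_append, List.count_replicate]
  exact fun e => absurd e.symm h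
theorem runSplit_rest_gt (v : Int) (l : List Int)
    (hs : l.Pairwise (· ≤ ·)) (hmin : ∀ w ∈ l, v ≤ w) :
    ∀ w ∈ (runSplit v l).2, v < w := by
  induction l with
  | nil => simp [runSplit]
  | cons x xs ih =>
    by_cases h : x = v
    · simp only [runSplit, h]
      exact ih (List.Pairwise.sublist (List.sublist_cons_self x xs) hs)
        (fun w hw => hmin w (List.mem_cons_of_mem x hw))
    · simp only [runSplit, if_neg h]
      intro w hw
      rcases List.mem_cons.mp hw with rfl | hw'
      · exact lt_of_le_of_ne (hmin w List.mem_cons_self) (fun e => h e.symm)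
      · have hx : v < x := lt_of_le_of_ne (hmin x List.mem_cons_self) (fun e => h e.symm)
        exact lt_of_lt_of_le hx ((List.pairwise_cons.mp hs).1 w hw')
theorem runSplit_rest_count_zero (v : Int) (l : List Int)
    (hs : l.Pairwise (· ≤ ·)) (hmin : ∀ w ∈ l, v ≤ w) :
    (runSplit v l).2.count v = 0 := by
  rw [List.count_eq_zero]
  intro hmem
  exact absurd rfl (ne_of_gt (runSplit_rest_gt v l hs hmin v hmem))
theorem runSplit_rest_pairwise (v : Int) (l : List Int) (hs : l.Pairwise (· ≤ ·)) :
    (runSplit v l).2.Pairwise (· ≤ ·) := by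
  have hsub : (runSplit v l).2.Sublist l := by
    conv_rhs => rw [runSplit_decomp v l]
    exact List.sublist_append_right _ _
  exact List.Pairwise.sublist hsub hs

theorem step_count (xs ys : List Int) (v w : Int)
    (hxs : xs.Pairwise (· ≤ ·)) (hys : ys.Pairwise (· ≤ ·))
    (hminx : ∀ u ∈ xs, v ≤ u) (hminy : ∀ u ∈ ys, v ≤ u)
    (IH : (mergeRuns (runSplit v xs).2 (runSplit v ys).2).count w
          = max ((runSplit v xs).2.count w) ((runSplit v ys).2.count w)) :
    (List.replicate (max (runSplit v xs).1 (runSplit v ys).1) v ++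
      mergeRuns (runSplit v xs).2 (runSplit v ys).2).count w
      = max (xs.count w) (ys.count w) := by
  rw [List.count_append, IH]
  by_cases hwv : v = w
  · subst hwv
    have za := runSplit_rest_count_zero v xs hxs hminx
    have zb := runSplit_rest_count_zero v ys hys hminy
    have ha := runSplit_count_self v xs
    have hb := runSplit_count_self v ys
    rw [za, zb]
    simp
    omega
  · have h1 := runSplit_count_ne v w xs (fun e => hwv e.symm)
    have h2 := runSplit_count_ne v w ys (fun e => hwv e.symm)
    rw [h1, h2]
    simp [List.count_replicate, hwv]

theorem mergeRuns_count : ∀ (n : Nat) (xs ys : List Int), xs.length + ys.length ≤ n →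
    xs.Pairwise (· ≤ ·) → ys.Pairwise (· ≤ ·) →
    ∀ w, (mergeRuns xs ys).count w = max (xs.count w) (ys.count w) := by
  intro n
  induction n with
  | zero =>
    intro xs ys hlen _ _ w
    cases xs with
    | cons a t => simp at hlen
    | nil =>
      cases ys with
      | cons a t => simp at hlen
      | nil => simp [mergeRuns]
  | succ n ih =>
    intro xs ys hlen hxs hys w
    match xs, ys with
    | [], [] => simp [mergeRuns]
    | x :: xs', [] =>
      have hminx : ∀ u ∈ x :: xs', x ≤ u := by
        intro u hu
        rcases List.mem_cons.mp hu with rfl | hu'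
        · exact le_refl u
        · exact (List.pairwise_cons.mp hxs).1 u hu'
      have hlt := runSplit_pos x x xs' rfl
      have hl := runSplit_len x (x :: xs')
      rw [mergeRuns]
      exact step_count (x :: xs') [] x w hxs hys hminx (by simp)
        (ih _ _ (by simp only [List.length_cons, List.length_nil] at hlen hl ⊢; omega)
          (runSplit_rest_pairwise x _ hxs) List.Pairwise.nil w)
    | [], y :: ys' =>
      have hminy : ∀ u ∈ y :: ys', y ≤ u := by
        intro u hu
        rcases List.mem_cons.mp hu with rfl | hu'
        · exact le_refl u
        · exact (List.pairwise_cons.mp hys).1 u hu'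
      have hlt := runSplit_pos y y ys' rfl
      have hl := runSplit_len y (y :: ys')
      rw [mergeRuns]
      exact step_count [] (y :: ys') y w hxs hys (by simp) hminy
        (ih _ _ (by simp only [List.length_cons, List.length_nil] at hlen hl ⊢; omega)
          List.Pairwise.nil (runSplit_rest_pairwise y _ hys) w)
    | x :: xs', y :: ys' =>
      have hvx : (if x ≤ y then x else y) ≤ x := by split <;> omega
      have hvy : (if x ≤ y then x else y) ≤ y := by split <;> omega
      have hminx : ∀ u ∈ x :: xs', (if x ≤ y then x else y) ≤ u := by
        intro u hu
        rcases List.mem_cons.mp hu with rfl | hu'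
        · exact hvx
        · exact le_trans hvx ((List.pairwise_cons.mp hxs).1 u hu')
      have hminy : ∀ u ∈ y :: ys', (if x ≤ y then x else y) ≤ u := by
        intro u hu
        rcases List.mem_cons.mp hu with rfl | hu'
        · exact hvy
        · exact le_trans hvy ((List.pairwise_cons.mp hys).1 u hu')
      have hpos : 0 < (runSplit (if x ≤ y then x else y) (x :: xs')).1 +
          (runSplit (if x ≤ y then x else y) (y :: ys')).1 := by
        by_cases hxy : x ≤ y
        · have := runSplit_pos (if x ≤ y then x else y) x xs' (by simp [hxy]); omega
        · have := runSplit_pos (if x ≤ y then x else y) y ys' (by simp [hxy]); omega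
      have h1 := runSplit_len (if x ≤ y then x else y) (x :: xs')
      have h2 := runSplit_len (if x ≤ y then x else y) (y :: ys')
      rw [mergeRuns]
      exact step_count (x :: xs') (y :: ys') (if x ≤ y then x else y) w hxs hys hminx hminy
        (ih _ _ (by simp only [List.length_cons] at hlen h1 h2 ⊢; omega)
          (runSplit_rest_pairwise _ _ hxs) (runSplit_rest_pairwise _ _ hys) w)

theorem mergeRuns_count' (xs ys : List Int)
    (hxs : xs.Pairwise (· ≤ ·)) (hys : ys.Pairwise (· ≤ ·)) (w : Int) :
    (mergeRuns xs ys).count w = max (xs.count w) (ys.count w) :=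
  mergeRuns_count (xs.length + ys.length) xs ys le_rfl hxs hys w

theorem mem_mergeRuns (xs ys : List Int)
    (hxs : xs.Pairwise (· ≤ ·)) (hys : ys.Pairwise (· ≤ ·)) (w : Int) :
    w ∈ mergeRuns xs ys ↔ w ∈ xs ∨ w ∈ ys := by
  rw [← List.count_pos_iff, mergeRuns_count' xs ys hxs hys w, lt_max_iff,
    List.count_pos_iff, List.count_pos_iff]

theorem step_pairwise (xs ys : List Int) (v : Int) (m : Nat)
    (hxs : xs.Pairwise (· ≤ ·)) (hys : ys.Pairwise (· ≤ ·))
    (hminx : ∀ u ∈ xs, v ≤ u) (hminy : ∀ u ∈ ys, v ≤ u)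
    (hmerged : (mergeRuns (runSplit v xs).2 (runSplit v ys).2).Pairwise (· ≤ ·)) :
    (List.replicate m v ++ mergeRuns (runSplit v xs).2 (runSplit v ys).2).Pairwise (· ≤ ·) := by
  rw [List.pairwise_append]
  refine ⟨?_, hmerged, ?_⟩
  · exact List.pairwise_replicate.mpr (Or.inr (le_refl v))
  · intro p hp q hq
    have hpv : p = v := List.eq_of_mem_replicate hp
    subst hpv
    have hq' := (mem_mergeRuns _ _ (runSplit_rest_pairwise p xs hxs)
      (runSplit_rest_pairwise p ys hys) q).1 hq
    rcases hq' with hq' | hq'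
    · exact le_of_lt (runSplit_rest_gt p xs hxs hminx q hq')
    · exact le_of_lt (runSplit_rest_gt p ys hys hminy q hq')

theorem mergeRuns_pairwise : ∀ (n : Nat) (xs ys : List Int), xs.length + ys.length ≤ n →
    xs.Pairwise (· ≤ ·) → ys.Pairwise (· ≤ ·) → (mergeRuns xs ys).Pairwise (· ≤ ·) := by
  intro n
  induction n with
  | zero =>
    intro xs ys hlen _ _
    cases xs with
    | cons a t => simp at hlen
    | nil =>
      cases ys with
      | cons a t => simp at hlen
      | nil => simp [mergeRuns]
  | succ n ih =>
    intro xs ys hlen hxs hys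
    match xs, ys with
    | [], [] => simp [mergeRuns]
    | x :: xs', [] =>
      have hminx : ∀ u ∈ x :: xs', x ≤ u := by
        intro u hu
        rcases List.mem_cons.mp hu with rfl | hu'
        · exact le_refl u
        · exact (List.pairwise_cons.mp hxs).1 u hu'
      have hlt := runSplit_pos x x xs' rfl
      have hl := runSplit_len x (x :: xs')
      rw [mergeRuns]
      exact step_pairwise (x :: xs') [] x _ hxs hys hminx (by simp)
        (ih _ _ (by
            have hz : (runSplit x ([] : List Int)).2 = ([] : List Int) := rfl
            simp only [List.length_cons, List.length_nil, hz] at hlen hl ⊢; omega)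
          (runSplit_rest_pairwise x _ hxs) List.Pairwise.nil)
    | [], y :: ys' =>
      have hminy : ∀ u ∈ y :: ys', y ≤ u := by
        intro u hu
        rcases List.mem_cons.mp hu with rfl | hu'
        · exact le_refl u
        · exact (List.pairwise_cons.mp hys).1 u hu'
      have hlt := runSplit_pos y y ys' rfl
      have hl := runSplit_len y (y :: ys')
      rw [mergeRuns]
      exact step_pairwise [] (y :: ys') y _ hxs hys (by simp) hminy
        (ih _ _ (by
            have hz : (runSplit y ([] : List Int)).2 = ([] : List Int) := rfl
            simp only [List.length_cons, List.length_nil, hz] at hlen hl ⊢; omega)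
          List.Pairwise.nil (runSplit_rest_pairwise y _ hys))
    | x :: xs', y :: ys' =>
      have hvx : (if x ≤ y then x else y) ≤ x := by split <;> omega
      have hvy : (if x ≤ y then x else y) ≤ y := by split <;> omega
      have hminx : ∀ u ∈ x :: xs', (if x ≤ y then x else y) ≤ u := by
        intro u hu
        rcases List.mem_cons.mp hu with rfl | hu'
        · exact hvx
        · exact le_trans hvx ((List.pairwise_cons.mp hxs).1 u hu')
      have hminy : ∀ u ∈ y :: ys', (if x ≤ y then x else y) ≤ u := by
        intro u hu
        rcases List.mem_cons.mp hu with rfl | hu'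
        · exact hvy
        · exact le_trans hvy ((List.pairwise_cons.mp hys).1 u hu')
      have hpos : 0 < (runSplit (if x ≤ y then x else y) (x :: xs')).1 +
          (runSplit (if x ≤ y then x else y) (y :: ys')).1 := by
        by_cases hxy : x ≤ y
        · have := runSplit_pos (if x ≤ y then x else y) x xs' (by simp [hxy]); omega
        · have := runSplit_pos (if x ≤ y then x else y) y ys' (by simp [hxy]); omega
      have h1 := runSplit_len (if x ≤ y then x else y) (x :: xs')
      have h2 := runSplit_len (if x ≤ y then x else y) (y :: ys')
      rw [mergeRuns]
      exact step_pairwise (x :: xs') (y :: ys') (if x ≤ y then x else y) _ hxs hys hminx hminy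
        (ih _ _ (by simp only [List.length_cons] at hlen h1 h2 ⊢; omega)
          (runSplit_rest_pairwise _ _ hxs) (runSplit_rest_pairwise _ _ hys))

-- A-side: counting in the flatMap of replicates over a duplicate-free key list
theorem count_flatMap_replicate (keys : List Int) (f : Int → Nat) (w : Int)
    (hnd : keys.Nodup) :
    (keys.flatMap (fun v => List.replicate (f v) v)).count w
      = if w ∈ keys then f w else 0 := by
  induction keys with
  | nil => simp
  | cons k ks ih =>
    rcases List.nodup_cons.mp hnd with ⟨hk, hnd'⟩
    rw [List.flatMap_cons, List.count_append, ih hnd']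
    by_cases hwk : w = k
    · subst hwk
      simp [hk]
    · simp [List.count_replicate, List.mem_cons, hwk]
      exact fun e => absurd e.symm hwk

-- A's result list (before sorting), with counts made explicit
theorem multiset_union_eq_sorted_flatMap (a b : List Int) :
    multiset_union a b
      = PySem.List.sorted
          ((PySem.Set.union (PySem.Set.ofList (PySem.Dict.counter a).keys)
              (PySem.Set.ofList (PySem.Dict.counter b).keys)).flatMap
            (fun v => List.replicate
              (max ((PySem.Dict.counter a).getD v 0) ((PySem.Dict.counter b).getD v 0)).toNat v))
          (fun x => x) false := by
  have h0 : multiset_union a b = PySem.List.sorted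
      ((PySem.Set.union (PySem.Set.ofList (PySem.Dict.counter a).keys)
          (PySem.Set.ofList (PySem.Dict.counter b).keys)).foldl
        (fun res v =>
          (PySem.List.pyRange 0 (max ((PySem.Dict.counter a).getD v 0)
              ((PySem.Dict.counter b).getD v 0)) 1).foldl (fun r _ => r ++ [v]) res) [])
      (fun x => x) false := rfl
  rw [h0]
  congr 1
  have hinner : ∀ (acc : List Int) (v : Int),
      v ∈ PySem.Set.union (PySem.Set.ofList (PySem.Dict.counter a).keys)
        (PySem.Set.ofList (PySem.Dict.counter b).keys) →
      (PySem.List.pyRange 0 (max ((PySem.Dict.counter a).getD v 0)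
          ((PySem.Dict.counter b).getD v 0)) 1).foldl (fun r _ => r ++ [v]) acc
        = acc ++ List.replicate
            (max ((PySem.Dict.counter a).getD v 0) ((PySem.Dict.counter b).getD v 0)).toNat v := by
    intro acc v _
    rw [PySem.List.foldl_append_singleton_eq_map, List.map_const',
      PySem.List.length_pyRange_one]
    simp
  rw [PySem.List.foldl_congr_mem _ _ _ _ hinner, PySem.List.foldl_append_eq_flatMap]
  simp

-- ===== VERDICT (by name: the statement is the Claim_ definition above) =====
theorem multiset_union_spec : Claim_equal_multiset_union := by
  intro a b _
  unfold Spec_multiset_union multiset_union_alt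
  rw [multiset_union_eq_sorted_flatMap]
  have hpa : (PySem.List.sorted a (fun x => x) false).Pairwise (· ≤ ·) :=
    PySem.List.sorted_pairwise a (fun x => x)
  have hpb : (PySem.List.sorted b (fun x => x) false).Pairwise (· ≤ ·) :=
    PySem.List.sorted_pairwise b (fun x => x)
  set B := mergeRuns (PySem.List.sorted a (fun x => x) false)
      (PySem.List.sorted b (fun x => x) false) with hB
  have hkeysnd : (PySem.Set.union (PySem.Set.ofList (PySem.Dict.counter a).keys)
      (PySem.Set.ofList (PySem.Dict.counter b).keys)).Nodup :=
    PySem.Set.nodup_union _ _ (PySem.Set.nodup_ofList _)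
  have hmem : ∀ w, w ∈ PySem.Set.union (PySem.Set.ofList (PySem.Dict.counter a).keys)
      (PySem.Set.ofList (PySem.Dict.counter b).keys) ↔ w ∈ a ∨ w ∈ b := by
    intro w
    rw [PySem.Set.mem_union, PySem.Set.mem_ofList, PySem.Set.mem_ofList,
      PySem.Dict.keys_counter, PySem.Dict.keys_counter,
      PySem.Set.mem_ofList, PySem.Set.mem_ofList]
  have hcnt : ∀ w, B.count w = max (a.count w) (b.count w) := by
    intro w
    rw [hB, mergeRuns_count' _ _ hpa hpb w,
      (PySem.List.sorted_perm (xs := a) (key := fun x => x) (rev := false)).count_eq,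
      (PySem.List.sorted_perm (xs := b) (key := fun x => x) (rev := false)).count_eq]
  have hperm : B.Perm ((PySem.Set.union (PySem.Set.ofList (PySem.Dict.counter a).keys)
      (PySem.Set.ofList (PySem.Dict.counter b).keys)).flatMap
        (fun v => List.replicate
          (max ((PySem.Dict.counter a).getD v 0) ((PySem.Dict.counter b).getD v 0)).toNat v)) := by
    rw [List.perm_iff_count]
    intro w
    rw [hcnt w, count_flatMap_replicate _ _ _ hkeysnd]
    by_cases hw : w ∈ a ∨ w ∈ b
    · rw [if_pos ((hmem w).mpr hw)]
      rw [PySem.Dict.getD_counter, PySem.Dict.getD_counter]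
      omega
    · rw [if_neg (fun h => hw ((hmem w).mp h))]
      rw [not_or] at hw
      rw [List.count_eq_zero_of_not_mem hw.1, List.count_eq_zero_of_not_mem hw.2]
      simp
  have hpw : B.Pairwise (· ≤ ·) :=
    mergeRuns_pairwise _ _ _ le_rfl hpa hpb
  exact PySem.List.sorted_id_eq_of_perm_of_pairwise _ _ hperm hpw
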